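-- pv_equiv track=rewrite | github.com/vamshikrishna970/pocketpaw | installer/launcher/bootstrap.py | _format_pip_error
-- ===== SOURCE A (Python) =====
-- def _format_pip_error(stderr: str) -> str:
--     """Extract a short, actionable message from pip/uv stderr output."""
--     for marker in ("ERROR:", "error:", "×"):
--         for line in stderr.splitlines():
--             stripped = line.strip()
--             if stripped.startswith(marker):
--                 return f"Install failed: {stripped}"
--
--     return (
--         "Failed to install pocketpaw. "
--         "Check the log at ~/.pocketpaw/logs/launcher.log for details."
--     )
-- ===== SOURCE B (Python) =====
-- def _rank(stripped):
--     for i, m in enumerate(("ERROR:", "error:", "\u00d7")):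
--         if stripped.startswith(m):
--             return i
--     return None
--
--
-- def _format_pip_error(stderr: str) -> str:
--     """Extract a short, actionable message from pip/uv stderr output."""
--     best = None  # (rank, stripped line) of the best match so far
--     for line in stderr.splitlines():
--         stripped = line.strip()
--         r = _rank(stripped)
--         if r is not None and (best is None or r < best[0]):
--             best = (r, stripped)
--     if best is not None:
--         return f"Install failed: {best[1]}"
--     return (
--         "Failed to install pocketpaw. "
--         "Check the log at ~/.pocketpaw/logs/launcher.log for details."
--     )
-- ===== Notes on version B (the rewrite author's own statement) =====
-- stated objective: faster
-- what changed: A rescans all stderr lines once per marker (marker-major nested loops with early return); B splits once and makes a single line-major pass keeping the best (lowest-priority-index) stripped match, overriding only on a strictly better rank so ties keep the first line.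
import Mathlib
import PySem

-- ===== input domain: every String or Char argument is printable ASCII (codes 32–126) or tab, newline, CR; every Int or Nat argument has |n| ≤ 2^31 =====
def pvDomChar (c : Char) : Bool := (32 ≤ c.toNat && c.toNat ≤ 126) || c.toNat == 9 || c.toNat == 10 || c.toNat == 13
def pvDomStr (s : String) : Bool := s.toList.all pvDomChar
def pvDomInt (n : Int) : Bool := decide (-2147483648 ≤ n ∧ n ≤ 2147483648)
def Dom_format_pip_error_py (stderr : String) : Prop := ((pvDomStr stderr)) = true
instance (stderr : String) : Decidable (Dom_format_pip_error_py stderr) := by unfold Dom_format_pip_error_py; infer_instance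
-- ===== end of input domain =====

-- B makes a single pass over the lines keeping the best-priority match instead of A's
-- marker-major rescans; return values agree on every input (objective: faster by a constant factor).

-- ===== PORT A =====
-- inner 'for line in stderr.splitlines(): …' with early return
def pvAInner (marker : String) : List String → Option String
  | [] => none
  | l :: ls =>
    let stripped := PySem.Str.strip l
    if PySem.Str.startswith stripped marker then some ("Install failed: " ++ stripped)
    else pvAInner marker ls

-- outer 'for marker in ("ERROR:", "error:", "×"): …'
def pvAOuter (stderr : String) : List String → Option String
  | [] => none
  | m :: ms =>
    match pvAInner m (PySem.Str.splitlines stderr) with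
    | some r => some r
    | none => pvAOuter stderr ms

def format_pip_error_py (stderr : String) : String :=
  match pvAOuter stderr ["ERROR:", "error:", "×"] with
  | some r => r
  | none => "Failed to install pocketpaw. Check the log at ~/.pocketpaw/logs/launcher.log for details."

-- ===== PORT B =====
-- '_rank' : loop over enumerate(markers)
def pvBRankGo (s : String) : List (Int × String) → Option Int
  | [] => none
  | (i, m) :: rest => if PySem.Str.startswith s m then some i else pvBRankGo s rest

def pvBRank (s : String) : Option Int :=
  pvBRankGo s (PySem.List.enumerate ["ERROR:", "error:", "×"])

-- one iteration of B's single pass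
def pvBStep (best : Option (Int × String)) (line : String) : Option (Int × String) :=
  let stripped := PySem.Str.strip line
  match pvBRank stripped with
  | none => best
  | some r =>
    match best with
    | none => some (r, stripped)
    | some b => if r < b.1 then some (r, stripped) else best

def format_pip_error_py_alt (stderr : String) : String :=
  match (PySem.Str.splitlines stderr).foldl pvBStep none with
  | some b => "Install failed: " ++ b.2
  | none => "Failed to install pocketpaw. Check the log at ~/.pocketpaw/logs/launcher.log for details."

-- ===== PRECONDITION & SPEC =====
def Spec_format_pip_error_py (stderr : String) (out : String) : Prop := out = format_pip_error_py_alt stderr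
instance (stderr : String) (out : String) : Decidable (Spec_format_pip_error_py stderr out) := by unfold Spec_format_pip_error_py; infer_instance

-- ===== CLAIM (what is proved, stated in full; the proofs are below) =====
def Claim_equal_format_pip_error_py : Prop := ∀ (stderr : String), Dom_format_pip_error_py stderr → Spec_format_pip_error_py stderr (format_pip_error_py stderr)

-- ===== LEMMAS AND PROOFS =====

-- left-biased minimum-by-rank on optional matches
def pvMerge : Option (Int × String) → Option (Int × String) → Option (Int × String)
  | none, o => o
  | some p, none => some p
  | some p, some q => if q.1 < p.1 then some q else some p

-- first stripped line starting with a marker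
def pvFirst (m : String) : List String → Option String
  | [] => none
  | l :: t =>
    if PySem.Str.startswith (PySem.Str.strip l) m then some (PySem.Str.strip l)
    else pvFirst m t

-- closed characterisation of B's fold state
def pvChar (ls : List String) : Option (Int × String) :=
  match pvFirst "ERROR:" ls with
  | some s => some (0, s)
  | none =>
    match pvFirst "error:" ls with
    | some s => some (1, s)
    | none => (pvFirst "×" ls).map (fun s => (2, s))

theorem pvAInner_eq (m : String) (ls : List String) :
    pvAInner m ls = (pvFirst m ls).map (fun s => "Install failed: " ++ s) := by
  induction ls with
  | nil => rfl
  | cons l t ih => simp only [pvAInner, pvFirst]; split_ifs <;> simp [ih]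

theorem pvMerge_none_right (a : Option (Int × String)) : pvMerge a none = a := by
  cases a <;> rfl

theorem pvBRank_eq (s : String) :
    pvBRank s = if PySem.Str.startswith s "ERROR:" = true then some 0
      else if PySem.Str.startswith s "error:" = true then some 1
      else if PySem.Str.startswith s "×" = true then some 2 else none := by
  have h : PySem.List.enumerate ["ERROR:", "error:", "×"] (0 : Int)
      = [(0, "ERROR:"), (1, "error:"), (2, "×")] := by
    simp [PySem.List.enumerate_cons, PySem.List.enumerate_nil]
  simp only [pvBRank, h, pvBRankGo]

theorem pvBStep_eq (b : Option (Int × String)) (l : String) :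
    pvBStep b l = pvMerge b (pvBStep none l) := by
  simp only [pvBStep]
  cases pvBRank (PySem.Str.strip l) with
  | none => exact (pvMerge_none_right b).symm
  | some r => cases b <;> rfl

theorem pvMerge_assoc (a b c : Option (Int × String)) :
    pvMerge (pvMerge a b) c = pvMerge a (pvMerge b c) := by
  cases a <;> cases b <;> cases c <;> simp only [pvMerge] <;> split_ifs <;>
    simp only [pvMerge] <;> (try split_ifs) <;> first | rfl | (exfalso; omega)

theorem pvFoldl_merge (ls : List String) (b : Option (Int × String)) :
    ls.foldl pvBStep b = pvMerge b (ls.foldl pvBStep none) := by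
  induction ls generalizing b with
  | nil => exact (pvMerge_none_right b).symm
  | cons l t ih =>
    simp only [List.foldl_cons]
    rw [ih (pvBStep b l), ih (pvBStep none l), pvBStep_eq b l, pvMerge_assoc]

theorem pvBest_eq (ls : List String) : ls.foldl pvBStep none = pvChar ls := by
  induction ls with
  | nil => rfl
  | cons l t ih =>
    rw [List.foldl_cons, pvFoldl_merge, ih]
    simp only [pvBStep, pvBRank_eq, pvChar, pvFirst]
    by_cases h0 : PySem.Str.startswith (PySem.Str.strip l) "ERROR:" = true <;>
    by_cases h1 : PySem.Str.startswith (PySem.Str.strip l) "error:" = true <;>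
    by_cases h2 : PySem.Str.startswith (PySem.Str.strip l) "×" = true <;>
    simp only [h0, h1, h2, if_true] <;>
    rcases e0 : pvFirst "ERROR:" t with _ | s0 <;>
    rcases e1 : pvFirst "error:" t with _ | s1 <;>
    rcases e2 : pvFirst "×" t with _ | s2 <;>
    simp [pvMerge]

theorem format_pip_error_py_spec : Claim_equal_format_pip_error_py := by
  intro stderr _
  show format_pip_error_py stderr = format_pip_error_py_alt stderr
  unfold format_pip_error_py format_pip_error_py_alt
  rw [pvBest_eq]
  simp only [pvAOuter, pvAInner_eq]
  rcases e0 : pvFirst "ERROR:" (PySem.Str.splitlines stderr) with _ | s0 <;>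
  rcases e1 : pvFirst "error:" (PySem.Str.splitlines stderr) with _ | s1 <;>
  rcases e2 : pvFirst "×" (PySem.Str.splitlines stderr) with _ | s2 <;>
  simp [pvChar, e0, e1, e2]
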